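-- pv_equiv track=rewrite | github.com/EstamelGG/EveSDE_2.0 | localization/localization_extractor.py | create_combined_localization
-- ===== SOURCE A (Python) =====
-- from typing import Dict, Any, List, Optional, Tuple
--
-- def create_combined_localization(unpickled_data: Dict[str, Dict[str, Any]]) -> Dict[str, Dict[str, str]]:
--     """
--     创建合并后的本地化数据结构
--     """
--     combined_data = {}
--
--     # 获取所有ID
--     all_ids = set()
--     for lang_data in unpickled_data.values():
--         all_ids.update(lang_data.keys())
--
--     # 合并所有语言的文本
--     for entry_id in all_ids:
--         combined_data[entry_id] = {}
--
--         for lang_code, lang_data in unpickled_data.items():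
--             if entry_id in lang_data:
--                 combined_data[entry_id][lang_code] = lang_data[entry_id]["text"]
--
--     return combined_data
-- ===== SOURCE B (Python) =====
-- def create_combined_localization(unpickled_data):
--     """
--     创建合并后的本地化数据结构
--     """
--     combined_data = {}
--     for lang_code, lang_data in unpickled_data.items():
--         for entry_id, value in lang_data.items():
--             combined_data.setdefault(entry_id, {})[lang_code] = value["text"]
--     return combined_data
-- ===== Notes on version B (the rewrite author's own statement) =====
-- stated objective: simpler
-- what changed: B drops A's separate set-collection pass over all languages and A's per-id rescan of every language (O(ids*langs) membership tests): it fills the result in one nested pass over unpickled_data.items()/lang_data.items() using setdefault, so no all_ids set and no 'entry_id in lang_data' tests exist.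
import Mathlib
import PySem

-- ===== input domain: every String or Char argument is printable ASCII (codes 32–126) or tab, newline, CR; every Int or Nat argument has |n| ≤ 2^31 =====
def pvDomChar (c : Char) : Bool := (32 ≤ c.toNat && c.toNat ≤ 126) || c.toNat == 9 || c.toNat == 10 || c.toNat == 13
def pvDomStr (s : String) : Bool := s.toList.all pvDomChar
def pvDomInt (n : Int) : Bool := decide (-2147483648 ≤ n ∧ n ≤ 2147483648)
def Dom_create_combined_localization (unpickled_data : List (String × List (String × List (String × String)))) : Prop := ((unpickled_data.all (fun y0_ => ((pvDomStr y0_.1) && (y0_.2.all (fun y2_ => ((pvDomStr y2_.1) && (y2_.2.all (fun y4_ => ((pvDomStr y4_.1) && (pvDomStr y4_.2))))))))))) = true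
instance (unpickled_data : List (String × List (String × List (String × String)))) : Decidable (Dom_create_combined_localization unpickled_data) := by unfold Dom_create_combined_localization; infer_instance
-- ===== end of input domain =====

-- B replaces A's two passes (collect an id set, then rescan every language per id) by one
-- nested pass with setdefault; same returned mapping (key order of the Python dict output is
-- compared as a dict). Equivalence of the RETURN value is what is proved.

-- ===== PORT A =====
-- value["text"]  (KeyError when "text" is absent is excluded by Pre_)
def pvText (v : List (String × String)) : String := (PySem.Dict.mk v).getD "text" ""

def create_combined_localization (unpickled_data : List (String × List (String × List (String × String)))) : List (String × List (String × String)) :=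
  -- all_ids = set(); for lang_data in values(): all_ids.update(lang_data.keys())
  let all_ids : PySem.Set String :=
    unpickled_data.foldl (fun s l => PySem.Set.update s ((PySem.Dict.mk l.2).keys)) PySem.Set.empty
  -- for entry_id in all_ids: combined_data[entry_id] = {}; for lang_code, lang_data in items(): if entry_id in lang_data: …
  let combined : PySem.Dict String (PySem.Dict String String) :=
    all_ids.foldl (fun cd entry_id =>
      cd.insert entry_id
        (unpickled_data.foldl (fun inner l =>
          if (PySem.Dict.mk l.2).contains entry_id then
            inner.insert l.1 (pvText ((PySem.Dict.mk l.2).getD entry_id []))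
          else inner) PySem.Dict.empty)) PySem.Dict.empty
  combined.items.map (fun p => (p.1, p.2.items))

-- ===== PORT B =====
def create_combined_localization_alt (unpickled_data : List (String × List (String × List (String × String)))) : List (String × List (String × String)) :=
  -- for lang_code, lang_data in items(): for entry_id, value in items(): combined.setdefault(entry_id, {})[lang_code] = value["text"]
  let combined : PySem.Dict String (PySem.Dict String String) :=
    unpickled_data.foldl (fun cd l =>
      l.2.foldl (fun cd e =>
        cd.modify e.1 PySem.Dict.empty
          (fun inner => inner.insert l.1 ((PySem.Dict.mk e.2).getD "text" ""))) cd) PySem.Dict.empty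
  combined.items.map (fun p => (p.1, p.2.items))

-- ===== PRECONDITION & SPEC =====
-- Pre_ excludes (a) inputs where some entry's value dict has no "text" key, on which Python A
-- raises KeyError, and (b) association lists with duplicate entry ids inside one language, which
-- a Python dict cannot contain and whose first-vs-last reading is accidental representation noise.
def Pre_create_combined_localization (unpickled_data : List (String × List (String × List (String × String)))) : Prop :=
  (unpickled_data.all (fun l =>
      (decide (l.2.map Prod.fst).Nodup) &&
      l.2.all (fun e => e.2.any (fun kv => kv.1 == "text")))) = true
instance (unpickled_data : List (String × List (String × List (String × String)))) : Decidable (Pre_create_combined_localization unpickled_data) := by unfold Pre_create_combined_localization; infer_instance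

def pvWitness_create_combined_localization : (List (String × List (String × List (String × String)))) :=
  [("en", [("1", [("text", "one")]), ("2", [("text", "two")])]),
   ("de", [("2", [("text", "zwei")])])]

def Spec_create_combined_localization (unpickled_data : List (String × List (String × List (String × String)))) (out : List (String × List (String × String))) : Prop := out = create_combined_localization_alt unpickled_data
instance (unpickled_data : List (String × List (String × List (String × String)))) (out : List (String × List (String × String))) : Decidable (Spec_create_combined_localization unpickled_data out) := by unfold Spec_create_combined_localization; infer_instance

-- ===== CLAIM (what is proved, stated in full; the proofs are below) =====
def Claim_equal_create_combined_localization : Prop := ∀ (unpickled_data : List (String × List (String × List (String × String)))), Dom_create_combined_localization unpickled_data → Pre_create_combined_localization unpickled_data → Spec_create_combined_localization unpickled_data (create_combined_localization unpickled_data)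

-- ===== LEMMAS AND PROOFS =====

-- the flattened traversal (entry_id, lang_code, text) of the whole input, in B's order
def pvFlat (ud : List (String × List (String × List (String × String)))) : List (String × String × String) :=
  ud.flatMap (fun l => l.2.map (fun e => (e.1, l.1, (PySem.Dict.mk e.2).getD "text" "")))

theorem foldl_flatMap {α β γ : Type} (g : α → List β) (f : γ → β → γ) (l : List α) (a : γ) :
    (l.flatMap g).foldl f a = l.foldl (fun a x => (g x).foldl f a) a := by
  induction l generalizing a with
  | nil => rfl
  | cons x t ih => simp [List.flatMap_cons, List.foldl_append, ih]

theorem getD_foldl_modify_insert (l : List (String × String × String))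
    (d : PySem.Dict String (PySem.Dict String String)) (c : String) :
    (l.foldl (fun cd t => cd.modify t.1 PySem.Dict.empty (fun inn => inn.insert t.2.1 t.2.2)) d).getD c PySem.Dict.empty
      = (l.filter (fun t => t.1 == c)).foldl (fun inn t => inn.insert t.2.1 t.2.2) (d.getD c PySem.Dict.empty) := by
  induction l generalizing d with
  | nil => rfl
  | cons t r ih =>
      simp only [List.foldl_cons, List.filter_cons]
      by_cases h : t.1 = c
      · simp [h, ih]
      · have hb : (t.1 == c) = false := by simp [h]
        simp [hb, ih, PySem.Dict.getD_modify, Ne.symm h]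

-- a nodup association list has at most one entry for a key; the filter is that entry exactly
theorem filter_key_nodup (xs : List (String × List (String × String))) (c : String)
    (h : (xs.map Prod.fst).Nodup) :
    xs.filter (fun e => e.1 == c)
      = if (PySem.Dict.mk xs).contains c then [(c, (PySem.Dict.mk xs).getD c [])] else [] := by
  induction xs with
  | nil => simp [PySem.Dict.contains]
  | cons e r ih =>
      obtain ⟨k, v⟩ := e
      simp only [List.map_cons, List.nodup_cons] at h
      by_cases hb : k = c
      · subst hb
        have hnr : ({ items := r } : PySem.Dict String (List (String × String))).contains k = false := by
          by_contra hcc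
          have hcc' : ({ items := r } : PySem.Dict String (List (String × String))).contains k = true := by
            revert hcc; cases ({ items := r } : PySem.Dict String (List (String × String))).contains k <;> simp
          have : k ∈ r.map Prod.fst := by
            have := (PySem.Dict.contains_iff_mem_keys _ _).1 hcc'
            simpa [PySem.Dict.keys_mk] using this
          exact h.1 this
        have hfr : r.filter (fun e => e.1 == k) = [] := by
          rw [ih h.2, hnr]; rfl
        have hcont : ({ items := (k, v) :: r } : PySem.Dict String (List (String × String))).contains k = true := by
          simp [PySem.Dict.contains]
        have hg : ({ items := (k, v) :: r } : PySem.Dict String (List (String × String))).getD k [] = v := by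
          simp [PySem.Dict.getD_eq_get?_getD, PySem.Dict.get?_mk_cons]
        simp [hcont, hg, hfr]
      · have hbb : (k == c) = false := by simp [hb]
        have hcont : ({ items := (k, v) :: r } : PySem.Dict String (List (String × String))).contains c
            = ({ items := r } : PySem.Dict String (List (String × String))).contains c := by
          simp [PySem.Dict.contains, hbb]
        have hg : ({ items := (k, v) :: r } : PySem.Dict String (List (String × String))).getD c []
            = ({ items := r } : PySem.Dict String (List (String × String))).getD c [] := by
          simp [PySem.Dict.getD_eq_get?_getD, PySem.Dict.get?_mk_cons, hbb]
        simp only [List.filter_cons, hbb, hcont, hg, ih h.2, Bool.false_eq_true,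
          if_false]

-- per language: A's guarded insert equals B's fold over that language's filtered contribution
theorem per_lang (l : String × List (String × List (String × String))) (c : String)
    (inn : PySem.Dict String String)
    (h : (l.2.map Prod.fst).Nodup) :
    (((l.2.map (fun e => (e.1, l.1, (PySem.Dict.mk e.2).getD "text" ""))).filter
        (fun t => t.1 == c)).foldl (fun inn t => inn.insert t.2.1 t.2.2) inn)
      = (if (PySem.Dict.mk l.2).contains c then
            inn.insert l.1 (pvText ((PySem.Dict.mk l.2).getD c []))
          else inn) := by
  have : (l.2.map (fun e => (e.1, l.1, (PySem.Dict.mk e.2).getD "text" ""))).filter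
        (fun t => t.1 == c)
      = (l.2.filter (fun e => e.1 == c)).map (fun e => (e.1, l.1, (PySem.Dict.mk e.2).getD "text" "")) := by
    rw [List.filter_map]; rfl
  rw [this, filter_key_nodup l.2 c h]
  by_cases hc : (PySem.Dict.mk l.2).contains c <;> simp [hc, pvText]

-- all nodup hypotheses gathered from Pre_
def pvNodups (ud : List (String × List (String × List (String × String)))) : Prop :=
  ∀ l ∈ ud, (l.2.map Prod.fst).Nodup

-- A's inner dict for one id equals B's accumulated inner dict for that id
theorem inner_eq_gen (ud : List (String × List (String × List (String × String)))) (c : String)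
    (h : pvNodups ud) (acc : PySem.Dict String String) :
    (ud.foldl (fun inner l =>
        if (PySem.Dict.mk l.2).contains c then
          inner.insert l.1 (pvText ((PySem.Dict.mk l.2).getD c []))
        else inner) acc)
      = (ud.foldl (fun a x =>
          (((x.2.map (fun e => (e.1, x.1, (PySem.Dict.mk e.2).getD "text" ""))).filter
              (fun t => t.1 == c)).foldl (fun inn t => inn.insert t.2.1 t.2.2) a)) acc) := by
  induction ud generalizing acc with
  | nil => rfl
  | cons l r ih =>
      simp only [List.foldl_cons]
      rw [per_lang l c acc (h l (by simp))]
      exact ih (fun x hx => h x (by simp [hx])) _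

theorem inner_eq (ud : List (String × List (String × List (String × String)))) (c : String)
    (h : pvNodups ud) :
    (ud.foldl (fun inner l =>
        if (PySem.Dict.mk l.2).contains c then
          inner.insert l.1 (pvText ((PySem.Dict.mk l.2).getD c []))
        else inner) PySem.Dict.empty)
      = ((pvFlat ud).filter (fun t => t.1 == c)).foldl
          (fun inn t => inn.insert t.2.1 t.2.2) PySem.Dict.empty := by
  rw [pvFlat, List.filter_flatMap, foldl_flatMap]
  exact inner_eq_gen ud c h _

-- A's all_ids is the set of first occurrences of ids in B's traversal order
theorem all_ids_eq (ud : List (String × List (String × List (String × String)))) :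
    (ud.foldl (fun s l => PySem.Set.update s ((PySem.Dict.mk l.2).keys)) PySem.Set.empty)
      = PySem.Set.ofList ((pvFlat ud).map (fun t => t.1)) := by
  rw [pvFlat, List.map_flatMap, PySem.Set.ofList_eq_foldl, foldl_flatMap]
  simp only [PySem.Set.update, PySem.Dict.keys_mk, PySem.Set.empty, List.map_map]
  rfl

theorem ports_eq (ud : List (String × List (String × List (String × String))))
    (h : pvNodups ud) :
    create_combined_localization ud = create_combined_localization_alt ud := by
  unfold create_combined_localization create_combined_localization_alt
  have hflat : (ud.foldl (fun cd l =>
      l.2.foldl (fun cd e =>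
        cd.modify e.1 PySem.Dict.empty
          (fun inner => inner.insert l.1 ((PySem.Dict.mk e.2).getD "text" ""))) cd) PySem.Dict.empty)
      = ((pvFlat ud).foldl (fun cd t =>
          cd.modify t.1 PySem.Dict.empty (fun inn => inn.insert t.2.1 t.2.2)) PySem.Dict.empty) := by
    rw [pvFlat, foldl_flatMap]
    congr 1
    funext cd l
    rw [List.foldl_map]
  simp only [hflat, all_ids_eq]
  congr 1
  -- items of the two combined dicts coincide
  set F := (pvFlat ud)
  set B := (F.foldl (fun cd t =>
      cd.modify t.1 PySem.Dict.empty (fun inn => inn.insert t.2.1 t.2.2)) PySem.Dict.empty)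
    with hB
  have hkeysB : B.keys = PySem.Set.ofList (F.map (fun t => t.1)) := by
    rw [hB, PySem.Dict.keys_foldl_modify_key F (fun t => t.1) PySem.Dict.empty
          (fun _ t inn => inn.insert t.2.1 t.2.2) PySem.Dict.empty]
    rw [PySem.Set.ofList_eq_foldl]
    rfl
  have hnodB : B.keys.Nodup := by
    rw [hkeysB]; exact PySem.Set.nodup_ofList _
  have hitemsB : B.items
      = (PySem.Set.ofList (F.map (fun t => t.1))).map (fun k => (k, B.getD k PySem.Dict.empty)) := by
    rw [PySem.Dict.items_eq_map_keys B hnodB PySem.Dict.empty, hkeysB]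
  have hitemsA : ((PySem.Set.ofList (F.map (fun t => t.1))).foldl (fun cd entry_id =>
      cd.insert entry_id
        (ud.foldl (fun inner l =>
          if (PySem.Dict.mk l.2).contains entry_id then
            inner.insert l.1 (pvText ((PySem.Dict.mk l.2).getD entry_id []))
          else inner) PySem.Dict.empty)) PySem.Dict.empty).items
      = (PySem.Set.ofList (F.map (fun t => t.1))).map (fun c => (c,
          (ud.foldl (fun inner l =>
            if (PySem.Dict.mk l.2).contains c then
              inner.insert l.1 (pvText ((PySem.Dict.mk l.2).getD c []))
            else inner) PySem.Dict.empty))) := by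
    rw [PySem.Dict.items_foldl_insert_fresh _ (fun entry_id => entry_id) _ _ (by intro a _; rfl)
          (by simp only [List.map_id_fun', id]; exact PySem.Set.nodup_ofList (F.map (fun t => t.1)))]
    rfl
  rw [hitemsA, hitemsB]
  apply List.map_congr_left
  intro c _
  rw [inner_eq ud c h, getD_foldl_modify_insert]
  rfl

-- ===== VERDICT (by name: the statement is the Claim_ definition above) =====
theorem create_combined_localization_spec : Claim_equal_create_combined_localization := by
  intro ud _ hpre
  unfold Spec_create_combined_localization
  apply ports_eq
  intro l hl
  unfold Pre_create_combined_localization at hpre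
  simp only [List.all_eq_true, Bool.and_eq_true, decide_eq_true_eq] at hpre
  exact (hpre l hl).1
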